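-- pv_equiv track=rewrite | github.com/bpaothatat/adventofcode | day6/day6.py | getStartOfMarkers
-- ===== SOURCE A (Python) =====
-- def getStartOfMarkers(value):
--     startOfPacket = -1
--     startOfMessage = -1
--     for i in range(len(value) - 3):
--         char = set()
--         for j in range(i, i + 4):
--             char.add(value[j])
--         if (len(char) == 4):
--             startOfPacket = i + 4
--             break
--     for i in range(len(value) - 13):
--         char = set()
--         for j in range(i, i + 14):
--             char.add(value[j])
--         if (len(char) == 14):
--             startOfMessage = i + 14
--             break
--     return startOfPacket, startOfMessage
-- ===== SOURCE B (Python) =====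
-- def getStartOfMarkers(value):
--     def findMarker(n):
--         if len(value) < n:
--             return -1
--         counts = {}
--         for ch in value[:n]:
--             counts[ch] = counts.get(ch, 0) + 1
--         if len(counts) == n:
--             return n
--         for i in range(n, len(value)):
--             old = value[i - n]
--             counts[old] = counts[old] - 1
--             if counts[old] == 0:
--                 del counts[old]
--             new = value[i]
--             counts[new] = counts.get(new, 0) + 1
--             if len(counts) == n:
--                 return i + 1
--         return -1
--     return findMarker(4), findMarker(14)
-- ===== Notes on version B (the rewrite author's own statement) =====
-- stated objective: faster
-- what changed: Replaced A's rebuild-a-set-per-window nested scans with a single sliding-window pass that maintains a count dict of the current window and compares its number of keys to the window size.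
import Mathlib
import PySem

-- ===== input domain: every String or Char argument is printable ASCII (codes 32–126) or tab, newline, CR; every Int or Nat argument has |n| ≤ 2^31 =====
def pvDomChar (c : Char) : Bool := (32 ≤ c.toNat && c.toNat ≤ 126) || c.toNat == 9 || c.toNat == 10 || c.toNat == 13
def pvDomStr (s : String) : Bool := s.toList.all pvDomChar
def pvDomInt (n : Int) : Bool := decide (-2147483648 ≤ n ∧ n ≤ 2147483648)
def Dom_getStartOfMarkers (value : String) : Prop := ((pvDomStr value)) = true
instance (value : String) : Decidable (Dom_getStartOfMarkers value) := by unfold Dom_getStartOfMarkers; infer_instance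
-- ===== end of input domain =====

-- B replaces A's per-window set rebuild with a single sliding-window pass maintaining a count
-- dict of the current window (objective: faster, one pass instead of rescanning every window).

-- ===== PORT A =====
-- A's two for-loops are the same loop body with constants 4 and 14; ported once, parameterised by n,
-- called with n = 4 and n = 14.  `value[j]` is always in range here, so the total pyGetD is exact.
def aScan (cs : List Char) (n i : Nat) : Int :=
  if h : (i : Int) < (cs.length : Int) - ((n : Int) - 1) then
    let char := (PySem.List.pyRange (i : Int) ((i : Int) + (n : Int)) 1).foldl
        (fun s j => PySem.Set.add s (PySem.List.pyGetD cs j ' ')) PySem.Set.empty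
    if PySem.Set.len char = (n : Int) then (i : Int) + (n : Int) else aScan cs n (i + 1)
  else -1
termination_by cs.length + 1 - i
decreasing_by omega

def getStartOfMarkers (value : String) : Int × Int :=
  (aScan value.toList 4 0, aScan value.toList 14 0)

-- ===== PORT B =====
def bLoop (cs : List Char) (n : Nat) (counts : PySem.Dict Char Int) (i : Nat) : Int :=
  if i < cs.length then
    let old := PySem.List.pyGetD cs ((i : Int) - (n : Int)) ' '
    let c1 := counts.insert old (counts.getD old 0 - 1)
    let c2 := if c1.getD old 0 = 0 then c1.erase old else c1
    let nw := PySem.List.pyGetD cs (i : Int) ' '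
    let c3 := c2.insert nw (c2.getD nw 0 + 1)
    if c3.size = n then (i : Int) + 1 else bLoop cs n c3 (i + 1)
  else -1
termination_by cs.length - i

def bFind (cs : List Char) (n : Nat) : Int :=
  if cs.length < n then -1
  else
    let counts := (PySem.List.slice cs none (some (n : Int))).foldl
        (fun d ch => d.insert ch (d.getD ch 0 + 1)) PySem.Dict.empty
    if counts.size = n then (n : Int) else bLoop cs n counts n

def getStartOfMarkers_alt (value : String) : Int × Int :=
  (bFind value.toList 4, bFind value.toList 14)

-- ===== PRECONDITION & SPEC =====
def Spec_getStartOfMarkers (value : String) (out : Int × Int) : Prop := out = getStartOfMarkers_alt value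
instance (value : String) (out : Int × Int) : Decidable (Spec_getStartOfMarkers value out) := by unfold Spec_getStartOfMarkers; infer_instance

-- ===== CLAIM (what is proved, stated in full; the proofs are below) =====
def Claim_equal_getStartOfMarkers : Prop := ∀ (value : String), Dom_getStartOfMarkers value → Spec_getStartOfMarkers value (getStartOfMarkers value)

-- ===== LEMMAS AND PROOFS =====

-- The window of length n starting at i, and the number of distinct characters of a list.
def win (cs : List Char) (n i : Nat) : List Char := (cs.drop i).take n
def dcount (l : List Char) : Nat := (PySem.Set.ofList l).length

-- Reference first-marker scan both ports are reduced to.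
def refScan (cs : List Char) (n i : Nat) : Int :=
  if i + n ≤ cs.length then
    if dcount (win cs n i) = n then (i : Int) + (n : Int) else refScan cs n (i + 1)
  else -1
termination_by cs.length + 1 - i
decreasing_by omega

lemma map_range_win (cs : List Char) (n i : Nat) (h : i + n ≤ cs.length) :
    (List.range n).map (fun k => cs.getD (i + k) ' ') = win cs n i := by
  apply List.ext_getElem
  · simp [win]; omega
  · intro k h1 h2
    have hk : k < n := by simpa using h1
    have hik : i + k < cs.length := by omega
    simp [win, List.getElem_take, List.getElem_drop, List.getElem?_eq_getElem hik]

lemma aSet_eq (cs : List Char) (n i : Nat) :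
    (PySem.List.pyRange (i : Int) ((i : Int) + (n : Int)) 1).foldl
        (fun s j => PySem.Set.add s (PySem.List.pyGetD cs j ' ')) PySem.Set.empty
      = PySem.Set.ofList ((List.range n).map (fun k => cs.getD (i + k) ' ')) := by
  rw [PySem.List.pyRange_one]
  have h1 : ((i : Int) + (n : Int) - (i : Int)).toNat = n := by omega
  rw [h1, List.foldl_map, PySem.Set.ofList_eq_foldl, List.foldl_map]
  apply PySem.List.foldl_congr_mem
  intro s k hk
  have : (i : Int) + (k : Int) = ((i + k : Nat) : Int) := by push_cast; ring
  rw [this, PySem.List.pyGetD_natCast]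

lemma aScan_eq (cs : List Char) (n : Nat) :
    ∀ k i, cs.length + 1 - i ≤ k → aScan cs n i = refScan cs n i := by
  intro k
  induction k with
  | zero =>
    intro i hi
    rw [aScan, refScan, dif_neg (by omega), if_neg (by omega)]
  | succ k ih =>
    intro i hi
    rw [aScan, refScan]
    by_cases hg : i + n ≤ cs.length
    · rw [dif_pos (by omega), if_pos hg]
      simp only [aSet_eq, map_range_win cs n i hg]
      have hlen : PySem.Set.len (PySem.Set.ofList (win cs n i)) = ((dcount (win cs n i) : Nat) : Int) := by
        simp [PySem.Set.len, dcount]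
      rw [hlen]
      by_cases hd : dcount (win cs n i) = n
      · rw [if_pos (by exact_mod_cast hd), if_pos hd]
      · rw [if_neg (by exact_mod_cast hd), if_neg hd]
        exact ih (i + 1) (by omega)
    · rw [dif_neg (by omega), if_neg hg]

-- PYSEM.md lists no lemmas about Dict.erase, so these three are proved here from its definition.
lemma find?_filter_erase (t : List (Char × Int)) (k k' : Char) (h : ¬ k' = k) :
    List.find? (fun p => p.1 == k') (t.filter (fun p => !p.1 == k)) = List.find? (fun p => p.1 == k') t := by
  induction t with
  | nil => rfl
  | cons p t iht =>
    rw [List.filter_cons]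
    by_cases hpk : p.1 = k
    · rw [if_neg (by simp [hpk]), List.find?_cons_of_neg (by simp [hpk]; exact fun hh => h hh.symm), iht]
    · rw [if_pos (by simp [hpk])]
      by_cases hpk' : p.1 = k'
      · rw [List.find?_cons_of_pos (by simp [hpk']), List.find?_cons_of_pos (by simp [hpk'])]
      · rw [List.find?_cons_of_neg (by simp [hpk']), List.find?_cons_of_neg (by simp [hpk']), iht]

lemma dict_get?_erase (d : PySem.Dict Char Int) (k k' : Char) :
    (d.erase k).get? k' = if k' = k then none else d.get? k' := by
  obtain ⟨items⟩ := d
  simp only [PySem.Dict.erase, PySem.Dict.get?]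
  split
  · next heq =>
    subst heq
    rw [List.find?_eq_none.mpr]
    · rfl
    · intro p hp
      have := (List.mem_filter.mp hp).2
      simp at this ⊢
      exact fun h => absurd h this
  · next hne => rw [find?_filter_erase _ _ _ hne]

lemma dict_getD_erase (d : PySem.Dict Char Int) (k k' : Char) (d0 : Int) :
    (d.erase k).getD k' d0 = if k' = k then d0 else d.getD k' d0 := by
  simp only [PySem.Dict.getD, dict_get?_erase]
  split <;> rfl

lemma dict_contains_erase (d : PySem.Dict Char Int) (k k' : Char) :
    (d.erase k).contains k' = if k' = k then false else d.contains k' := by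
  rw [PySem.Dict.contains_eq_isSome_get?, PySem.Dict.contains_eq_isSome_get?, dict_get?_erase]
  split <;> rfl

lemma dict_nodup_keys_erase (d : PySem.Dict Char Int) (k : Char) (h : d.keys.Nodup) :
    (d.erase k).keys.Nodup := by
  obtain ⟨items⟩ := d
  have hsub : ((items.filter (fun p => !p.1 == k)).map (fun p => p.1)).Sublist
      (items.map (fun p => p.1)) := List.Sublist.map _ List.filter_sublist
  exact hsub.nodup h

lemma size_eq_dcount (w : List Char) (d : PySem.Dict Char Int)
    (hnd : d.keys.Nodup) (hc : ∀ c, d.contains c = true ↔ c ∈ w) : d.size = dcount w := by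
  have hperm : d.keys.Perm (PySem.Set.ofList w) :=
    (List.perm_ext_iff_of_nodup hnd (PySem.Set.nodup_ofList w)).mpr
      (fun a => by rw [← PySem.Dict.contains_iff_mem_keys, hc, PySem.Set.mem_ofList])
  have hlen := hperm.length_eq
  simpa [PySem.Dict.size, PySem.Dict.keys, dcount] using hlen

lemma win_cons (cs : List Char) (n s : Nat) (hn : 1 ≤ n) (hs : s < cs.length) :
    win cs n s = cs[s] :: (cs.drop (s + 1)).take (n - 1) := by
  obtain ⟨m, rfl⟩ : ∃ m, n = m + 1 := ⟨n - 1, by omega⟩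
  rw [win, List.drop_eq_getElem_cons hs, List.take_succ_cons]
  simp

lemma win_snoc (cs : List Char) (n s : Nat) (hn : 1 ≤ n) (h : s + 1 + n ≤ cs.length) :
    win cs n (s + 1) = (cs.drop (s + 1)).take (n - 1) ++ [cs[s + n]'(by omega)] := by
  obtain ⟨m, rfl⟩ : ∃ m, n = m + 1 := ⟨n - 1, by omega⟩
  rw [win, List.take_add_one]
  have h1 : s + 1 + m < cs.length := by omega
  rw [List.getElem?_drop, List.getElem?_eq_getElem h1]
  have h2 : s + 1 + m = s + (m + 1) := by omega
  simp [h2]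

lemma ins_getD_a (d : PySem.Dict Char Int) (a : Char) (w' : List Char)
    (h1 : ∀ c, d.getD c 0 = ((a :: w').count c : Int)) :
    (d.insert a (d.getD a 0 - 1)).getD a 0 = (w'.count a : Int) := by
  rw [PySem.Dict.getD_insert_self, h1, List.count_cons_self]
  push_cast; ring

lemma ins_getD_ne (d : PySem.Dict Char Int) (a : Char) (w' : List Char)
    (h1 : ∀ c, d.getD c 0 = ((a :: w').count c : Int)) (c : Char) (hne : c ≠ a) :
    (d.insert a (d.getD a 0 - 1)).getD c 0 = (w'.count c : Int) := by
  rw [PySem.Dict.getD_insert, if_neg hne, h1]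
  simp [List.count_cons]
  exact fun h => hne h.symm

lemma d2_getD (d : PySem.Dict Char Int) (a : Char) (w' : List Char)
    (h1 : ∀ c, d.getD c 0 = ((a :: w').count c : Int)) (c : Char) :
    (if (d.insert a (d.getD a 0 - 1)).getD a 0 = 0 then (d.insert a (d.getD a 0 - 1)).erase a
     else d.insert a (d.getD a 0 - 1)).getD c 0 = (w'.count c : Int) := by
  by_cases hz : (d.insert a (d.getD a 0 - 1)).getD a 0 = 0
  · rw [if_pos hz, dict_getD_erase]
    by_cases hca : c = a
    · subst hca
      rw [if_pos rfl]
      have := ins_getD_a d c w' h1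
      rw [hz] at this
      exact this
    · rw [if_neg hca]
      exact ins_getD_ne d a w' h1 c hca
  · rw [if_neg hz]
    by_cases hca : c = a
    · subst hca; exact ins_getD_a d c w' h1
    · exact ins_getD_ne d a w' h1 c hca

lemma d2_contains (d : PySem.Dict Char Int) (a : Char) (w' : List Char)
    (h1 : ∀ c, d.getD c 0 = ((a :: w').count c : Int))
    (h3 : ∀ c, d.contains c = true ↔ c ∈ a :: w') (c : Char) :
    ((if (d.insert a (d.getD a 0 - 1)).getD a 0 = 0 then (d.insert a (d.getD a 0 - 1)).erase a
      else d.insert a (d.getD a 0 - 1)).contains c = true) ↔ c ∈ w' := by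
  have hA := ins_getD_a d a w' h1
  by_cases hz : (d.insert a (d.getD a 0 - 1)).getD a 0 = 0
  · have hnotin : a ∉ w' := by
      rw [← List.count_eq_zero (l := w') (a := a)]
      rw [hz] at hA
      omega
    rw [if_pos hz, dict_contains_erase]
    by_cases hca : c = a
    · simp [hca, hnotin]
    · rw [if_neg hca, PySem.Dict.contains_insert, Bool.or_eq_true, beq_iff_eq]
      rw [h3 c]
      simp [hca, List.mem_cons]
  · have hin : a ∈ w' := by
      by_contra hno
      rw [hA, List.count_eq_zero.mpr hno] at hz
      exact hz rfl
    rw [if_neg hz, PySem.Dict.contains_insert, Bool.or_eq_true, beq_iff_eq]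
    rw [h3 c]
    by_cases hca : c = a
    · simp [hca, hin]
    · simp [hca, List.mem_cons]

lemma d2_nodup (d : PySem.Dict Char Int) (a : Char) (w : Int) (h2 : d.keys.Nodup) :
    (if (d.insert a w).getD a 0 = 0 then (d.insert a w).erase a
     else d.insert a w).keys.Nodup := by
  split
  · exact dict_nodup_keys_erase _ _ (PySem.Dict.nodup_keys_insert d a w h2)
  · exact PySem.Dict.nodup_keys_insert d a w h2

lemma bLoop_eq (cs : List Char) (n : Nat) (hn : 1 ≤ n) :
    ∀ k i d, n ≤ i → cs.length - i ≤ k →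
      (∀ c, d.getD c 0 = ((win cs n (i - n)).count c : Int)) →
      d.keys.Nodup →
      (∀ c, d.contains c = true ↔ c ∈ win cs n (i - n)) →
      bLoop cs n d i = refScan cs n (i - n + 1) := by
  intro k
  induction k with
  | zero =>
    intro i d hni hk h1 h2 h3
    rw [bLoop, refScan, if_neg (show ¬ i < cs.length by omega),
      if_neg (show ¬ i - n + 1 + n ≤ cs.length by omega)]
  | succ k ih =>
    intro i d hni hk h1 h2 h3
    rw [bLoop, refScan]
    by_cases hg : i < cs.length
    · rw [if_pos hg, if_pos (show i - n + 1 + n ≤ cs.length by omega)]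
      set s := i - n with hsdef
      have hsi : i = s + n := by omega
      have hs_lt : s < cs.length := by omega
      have hsn : s + 1 + n ≤ cs.length := by omega
      have hold : PySem.List.pyGetD cs ((i : Int) - (n : Int)) ' ' = cs[s] := by
        have he : (i : Int) - (n : Int) = ((s : Nat) : Int) := by omega
        rw [he, PySem.List.pyGetD_natCast, List.getD_eq_getElem _ _ hs_lt]
      have hnew : PySem.List.pyGetD cs (i : Int) ' ' = cs[i] := by
        rw [PySem.List.pyGetD_natCast, List.getD_eq_getElem _ _ hg]
      have hbi : cs[s + n]'(by omega) = cs[i]'hg := by congr 1; omega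
      have hw : win cs n s = cs[s] :: (cs.drop (s + 1)).take (n - 1) := win_cons cs n s hn hs_lt
      have hw2 : win cs n (s + 1) = (cs.drop (s + 1)).take (n - 1) ++ [cs[i]'hg] := by
        rw [win_snoc cs n s hn hsn, hbi]
      simp only [hold, hnew]
      have h1' : ∀ c, d.getD c 0 = ((cs[s] :: (cs.drop (s + 1)).take (n - 1)).count c : Int) := by
        intro c; rw [h1 c, hw]
      have h3' : ∀ c, d.contains c = true ↔ c ∈ cs[s] :: (cs.drop (s + 1)).take (n - 1) := by
        intro c; rw [h3 c, hw]
      set w' := (cs.drop (s + 1)).take (n - 1) with hw'def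
      set d2 := (if (d.insert cs[s] (d.getD cs[s] 0 - 1)).getD cs[s] 0 = 0
          then (d.insert cs[s] (d.getD cs[s] 0 - 1)).erase cs[s]
          else d.insert cs[s] (d.getD cs[s] 0 - 1)) with hd2def
      set d3 := d2.insert cs[i] (d2.getD cs[i] 0 + 1) with hd3def
      have hg3 : ∀ c, d3.getD c 0 = ((w' ++ [cs[i]'hg]).count c : Int) := by
        intro c
        rw [hd3def, PySem.Dict.getD_insert, List.count_append]
        by_cases hc : c = cs[i]'hg
        · rw [if_pos hc, hd2def, d2_getD d _ w' h1']
          subst hc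
          simp
        · rw [if_neg hc, hd2def, d2_getD d _ w' h1']
          simp [List.count_singleton]
          exact fun h => hc h.symm
      have hc3 : ∀ c, d3.contains c = true ↔ c ∈ w' ++ [cs[i]'hg] := by
        intro c
        rw [hd3def, PySem.Dict.contains_insert, Bool.or_eq_true, beq_iff_eq, hd2def,
          d2_contains d _ w' h1' h3', List.mem_append, List.mem_singleton]
        tauto
      have hn3 : d3.keys.Nodup := by
        rw [hd3def]
        exact PySem.Dict.nodup_keys_insert _ _ _ (hd2def ▸ d2_nodup d _ _ h2)
      have hsz : d3.size = dcount (win cs n (s + 1)) := by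
        rw [hw2]
        exact size_eq_dcount _ _ hn3 hc3
      by_cases hd : dcount (win cs n (s + 1)) = n
      · rw [if_pos (by rw [hsz]; exact hd), if_pos hd]
        push_cast
        omega
      · rw [if_neg (by rw [hsz]; exact hd), if_neg hd]
        have hin1 : i + 1 - n = s + 1 := by omega
        have := ih (i + 1) d3 (by omega) (by omega)
          (by intro c; rw [hin1, hw2]; exact hg3 c)
          hn3
          (by intro c; rw [hin1, hw2]; exact hc3 c)
        rw [this, hin1]
    · rw [if_neg hg, if_neg (show ¬ i - n + 1 + n ≤ cs.length by omega)]

lemma bFind_eq (cs : List Char) (n : Nat) (hn : 1 ≤ n) : bFind cs n = refScan cs n 0 := by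
  rw [bFind, refScan]
  by_cases h : cs.length < n
  · rw [if_pos h, if_neg (show ¬ 0 + n ≤ cs.length by omega)]
  · rw [if_neg h, if_pos (show 0 + n ≤ cs.length by omega)]
    rw [PySem.List.slice_to cs (by positivity)]
    have ht : ((n : Int)).toNat = n := by omega
    rw [ht, PySem.Dict.foldl_insert_getD_add_one_eq_counter]
    have hwin0 : win cs n 0 = cs.take n := by simp [win]
    have hcont : ∀ c, (PySem.Dict.counter (cs.take n)).contains c = true ↔ c ∈ win cs n 0 := by
      intro c
      rw [PySem.Dict.contains_counter, hwin0]
      simp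
    have hsz : (PySem.Dict.counter (cs.take n)).size = dcount (win cs n 0) :=
      size_eq_dcount _ _ (PySem.Dict.nodup_keys_counter _) hcont
    by_cases hd : dcount (win cs n 0) = n
    · rw [if_pos (by rw [hsz]; exact hd), if_pos hd]
      simp
    · rw [if_neg (by rw [hsz]; exact hd), if_neg hd]
      have hmain := bLoop_eq cs n hn cs.length n (PySem.Dict.counter (cs.take n)) le_rfl (by omega)
        (by intro c; rw [show n - n = 0 by omega, hwin0, PySem.Dict.getD_counter])
        (PySem.Dict.nodup_keys_counter _)
        (by intro c; rw [show n - n = 0 by omega]; exact hcont c)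
      rw [hmain, show n - n + 1 = 0 + 1 by omega]

-- ===== VERDICT (by name: the statement is the Claim_ definition above) =====
theorem getStartOfMarkers_spec : Claim_equal_getStartOfMarkers := by
  intro value _
  unfold Spec_getStartOfMarkers getStartOfMarkers getStartOfMarkers_alt
  rw [aScan_eq value.toList 4 (value.toList.length + 1) 0 (by omega),
      aScan_eq value.toList 14 (value.toList.length + 1) 0 (by omega),
      bFind_eq value.toList 4 (by omega), bFind_eq value.toList 14 (by omega)]
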